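-- pv_equiv track=rewrite | github.com/shueho/BioDataTools | Plotscript/VisualizeGeneArrangement/VisualizeGeneArrangement.py | getStrain
-- ===== SOURCE A (Python) =====
-- def getStrain(lis):
--     g = dict()
--     for i in lis:
--         s,m,c = 0,0,0
--         for j in i:
--             if j not in "!:- ":
--                 g[i[i.find(j):].strip().replace(" ","")] = [s,m,c]
--                 break
--             if j == "-":
--                 s = 1
--             if j == ":":
--                 m = 1
--             if j == "!":
--                 c = 1
--     return g
-- ===== SOURCE B (Python) =====
-- def getStrain(lis):
--     g = dict()
--     for i in lis:
--         rest = i.lstrip("!:- ")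
--         if rest:
--             prefix = i[:len(i) - len(rest)]
--             g[rest.strip().replace(" ", "")] = [
--                 1 if "-" in prefix else 0,
--                 1 if ":" in prefix else 0,
--                 1 if "!" in prefix else 0,
--             ]
--     return g
-- ===== Notes on version B (the rewrite author's own statement) =====
-- stated objective: simpler
-- what changed: Replaces A's stateful per-character scan with break (and the redundant i.find(j) re-search for the break position) by lstrip("!:- ") to split each string into its marker prefix and remainder, deriving the three flags by membership tests on the prefix.
import Mathlib
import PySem

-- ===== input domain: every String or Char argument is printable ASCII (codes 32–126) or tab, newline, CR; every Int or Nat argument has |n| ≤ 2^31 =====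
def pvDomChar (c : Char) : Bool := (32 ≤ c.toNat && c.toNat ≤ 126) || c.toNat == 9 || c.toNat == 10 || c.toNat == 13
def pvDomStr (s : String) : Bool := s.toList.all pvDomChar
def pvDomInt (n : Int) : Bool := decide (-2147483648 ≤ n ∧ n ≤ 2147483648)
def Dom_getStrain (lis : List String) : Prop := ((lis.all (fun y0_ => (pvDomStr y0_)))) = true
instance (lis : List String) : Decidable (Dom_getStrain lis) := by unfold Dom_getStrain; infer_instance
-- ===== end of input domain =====

-- B replaces A's per-character scan-with-break by lstrip("!:- ") plus membership tests on the
-- stripped-off prefix (objective: simpler — no inner loop state, no break).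

-- ===== PORT A =====
def getStrainLoopA (i : List Char) (g : PySem.Dict String (List Int))
    (s m c : Int) : List Char → PySem.Dict String (List Int)
  | [] => g
  | j :: rest =>
    if PySem.Chars.isIn [j] "!:- ".toList then
      getStrainLoopA i g
        (if j = '-' then 1 else s) (if j = ':' then 1 else m) (if j = '!' then 1 else c) rest
    else
      g.insert (String.ofList (PySem.Chars.replace
          (PySem.Chars.strip (PySem.List.slice i (some (PySem.Chars.find i [j])) none))
          [' '] [])) [s, m, c]

def getStrain (lis : List String) : List (String × List Int) :=
  (lis.foldl (fun g i => getStrainLoopA i.toList g 0 0 0 i.toList)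
    (PySem.Dict.empty : PySem.Dict String (List Int))).items

-- ===== PORT B =====
-- step of B's loop body, on the character list of one string
def getStrainStepB (g : PySem.Dict String (List Int)) (i : List Char) :
    PySem.Dict String (List Int) :=
  -- rest = i.lstrip("!:- ")  (drop leading chars from the set; exact for lstrip with a chars argument)
  let rest := i.dropWhile (fun ch => decide (ch ∈ "!:- ".toList))
  if rest ≠ [] then
    -- prefix = i[:len(i)-len(rest)]
    let pre := PySem.List.slice i none (some ((i.length : Int) - (rest.length : Int)))
    g.insert (String.ofList (PySem.Chars.replace (PySem.Chars.strip rest) [' '] []))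
      [if PySem.Chars.isIn ['-'] pre then 1 else 0,
       if PySem.Chars.isIn [':'] pre then 1 else 0,
       if PySem.Chars.isIn ['!'] pre then 1 else 0]
  else g

def getStrain_alt (lis : List String) : List (String × List Int) :=
  (lis.foldl (fun g i => getStrainStepB g i.toList)
    (PySem.Dict.empty : PySem.Dict String (List Int))).items

-- ===== PRECONDITION & SPEC =====
def Spec_getStrain (lis : List String) (out : List (String × List Int)) : Prop := out = getStrain_alt lis
instance (lis : List String) (out : List (String × List Int)) : Decidable (Spec_getStrain lis out) := by unfold Spec_getStrain; infer_instance

-- ===== CLAIM =====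
def Claim_equal_getStrain : Prop := ∀ (lis : List String), Dom_getStrain lis → Spec_getStrain lis (getStrain lis)

-- ===== LEMMAS AND PROOFS =====

-- the first occurrence of j in pre ++ j :: rest is at pre.length when j ∉ pre
theorem find_first_after (pre rest : List Char) (j : Char) (hj : j ∉ pre) :
    PySem.Chars.find (pre ++ j :: rest) [j] = (pre.length : Int) := by
  set s := pre ++ j :: rest with hs
  have hin : [j] <:+: s := (List.singleton_infix_iff j s).mpr (by simp [hs])
  have hne : PySem.Chars.find s [j] ≠ -1 := (PySem.Chars.find_ne_neg_one_iff s [j]).mpr hin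
  have h0 : PySem.Chars.findFrom s [j] ((0:Nat):Int) ≠ -1 := by simpa using hne
  obtain ⟨h1, h2, h3⟩ := PySem.Chars.findFrom_natCast_spec s [j] 0 (Nat.zero_le _) h0
  rw [show ((0:Nat):Int) = (0:Int) by norm_num, PySem.Chars.findFrom_zero] at h1 h2 h3
  set n := PySem.Chars.find s [j] with hn
  have hle : n.toNat ≤ pre.length := by
    by_contra hlt
    push Not at hlt
    exact h3 pre.length (Nat.zero_le _) hlt (by simp [hs])
  have hge : ¬ n.toNat < pre.length := by
    intro hlt
    obtain ⟨t, ht⟩ := h2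
    have hdrop : s.drop n.toNat = j :: t := (by simpa using ht : j :: t = s.drop n.toNat).symm
    have hhead : s[n.toNat]? = some j := by rw [← List.head?_drop, hdrop]; rfl
    have : pre[n.toNat]? = some j := by
      rw [hs] at hhead
      rwa [List.getElem?_append_left hlt] at hhead
    exact hj (List.mem_of_getElem? this)
  have : n.toNat = pre.length := le_antisymm hle (not_lt.mp hge)
  omega

-- one-step unfolding of A's inner loop on a cons
theorem loopA_cons (i : List Char) (g : PySem.Dict String (List Int)) (s m c : Int)
    (j : Char) (rest : List Char) :
    getStrainLoopA i g s m c (j :: rest) =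
      if PySem.Chars.isIn [j] "!:- ".toList then
        getStrainLoopA i g
          (if j = '-' then 1 else s) (if j = ':' then 1 else m) (if j = '!' then 1 else c) rest
      else
        g.insert (String.ofList (PySem.Chars.replace
            (PySem.Chars.strip (PySem.List.slice i (some (PySem.Chars.find i [j])) none))
            [' '] [])) [s, m, c] := rfl

-- loop invariant: after consuming a marker prefix 'pre' with flags matching membership in 'pre',
-- A's inner loop computes B's step
theorem loopA_inv (g : PySem.Dict String (List Int)) (cs : List Char) :
    ∀ pre : List Char, (∀ ch ∈ pre, ch ∈ "!:- ".toList) →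
    getStrainLoopA (pre ++ cs) g
      (if '-' ∈ pre then 1 else 0) (if ':' ∈ pre then 1 else 0) (if '!' ∈ pre then 1 else 0) cs
    = getStrainStepB g (pre ++ cs) := by
  induction cs with
  | nil =>
    intro pre hpre
    have hdw : (pre ++ ([]:List Char)).dropWhile (fun ch => decide (ch ∈ "!:- ".toList)) = [] := by
      rw [List.dropWhile_append_of_pos (by intro c hc; simpa using hpre c hc)]
      rfl
    have hB : getStrainStepB g (pre ++ []) = g := by
      simp only [getStrainStepB, hdw, ne_eq, not_true_eq_false, if_false]
    rw [hB]
    rfl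
  | cons j cs' ih =>
    intro pre hpre
    have hmem : PySem.Chars.isIn [j] "!:- ".toList = decide (j ∈ "!:- ".toList) := by
      rw [Bool.eq_iff_iff, PySem.Chars.isIn_iff_infix, List.singleton_infix_iff]
      simp
    have hflagup : ∀ ch : Char, (if j = ch then (1:Int) else if ch ∈ pre then 1 else 0)
        = (if ch ∈ pre ++ [j] then 1 else 0) := by
      intro ch
      by_cases h1 : j = ch
      · subst h1; simp
      · have h1' : ¬ ch = j := fun h => h1 h.symm
        simp [List.mem_append, h1, h1']
    by_cases hj : j ∈ "!:- ".toList
    · -- marker char: update the flags and recurse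
      rw [loopA_cons, if_pos (by rw [hmem]; simpa using hj)]
      rw [hflagup '-', hflagup ':', hflagup '!']
      have hpre' : ∀ ch ∈ pre ++ [j], ch ∈ "!:- ".toList := by
        intro c hc
        rcases List.mem_append.mp hc with h | h
        · exact hpre c h
        · have : c = j := by simpa using h
          rw [this]; exact hj
      have hstep := ih (pre ++ [j]) hpre'
      rw [List.append_assoc, List.singleton_append] at hstep
      exact hstep
    · -- first non-marker char: both sides insert the same key and value
      have hjpre : j ∉ pre := fun h => hj (hpre j h)
      have hfind := find_first_after pre cs' j hjpre
      have hdw : (pre ++ j :: cs').dropWhile (fun ch => decide (ch ∈ "!:- ".toList)) = j :: cs' := by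
        rw [List.dropWhile_append_of_pos (by intro c hc; simpa using hpre c hc)]
        rw [List.dropWhile_cons, if_neg (by simpa using hj)]
      have hslice : PySem.List.slice (pre ++ j :: cs') (some ((pre.length : Nat) : Int)) none = j :: cs' := by
        rw [PySem.List.slice_from_natCast]
        exact List.drop_left
      have hlen : (((pre ++ j :: cs').length : Nat) : Int) - (((j :: cs').length : Nat) : Int)
          = ((pre.length : Nat) : Int) := by
        simp
      have hpreslice : PySem.List.slice (pre ++ j :: cs') none (some ((pre.length : Nat) : Int)) = pre := by
        rw [PySem.List.slice_to_natCast]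
        exact List.take_left
      have hflag : ∀ ch : Char, (if PySem.Chars.isIn [ch] pre then (1:Int) else 0)
          = (if ch ∈ pre then 1 else 0) := by
        intro ch
        congr 1
        rw [Bool.eq_iff_iff, PySem.Chars.isIn_iff_infix, List.singleton_infix_iff]
        simp
      rw [loopA_cons, if_neg (by rw [hmem]; simpa using hj), hfind, hslice]
      simp only [getStrainStepB, hdw, hlen, hpreslice, ne_eq, reduceCtorEq, not_false_eq_true,
        if_true, hflag]

-- ===== VERDICT =====
theorem getStrain_spec : Claim_equal_getStrain := by
  intro lis _
  unfold Spec_getStrain getStrain getStrain_alt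
  congr 2
  funext g i
  have := loopA_inv g i.toList [] (by intro c hc; cases hc)
  simpa using this
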